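-- pv_equiv track=rewrite | github.com/DongGyu123/practice | 자료구조/Dict/homework.py | larg_but_min_freq
-- ===== SOURCE A (Python) =====
-- def larg_but_min_freq(arr,n) :
--   """
--   >>> larg_but_min_freq([1,2,3,3,3,3,3,4,5],9)
--   5
--   >>> larg_but_min_freq([2,2,5,50,1],5)
--   50
--   >>> larg_but_min_freq([1,1,1,2,2,2,3,3,2],9)
--   3
--   >>> larg_but_min_freq([1,1,1,2,2,2,3,3,3],9)
--   3
--   >>> larg_but_min_freq([-1,-1,-1,-2,-3,-4],6)
--   -2
--   >>> larg_but_min_freq([-1,2,-3,4,-5,6],6)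
--   6
--   >>> larg_but_min_freq([1,1,1,1,1,1,1,1],8)
--   1
--   >>> larg_but_min_freq([1],1)
--   1
--   """
--   d={}
--   for i in arr:
--     if i in d.keys():
--       d[i]+=1
--     else:
--       d[i]=1
--   array =[k for k,v in d.items() if min(d.values()) == v]
--   return max(array)
-- ===== SOURCE B (Python) =====
-- def larg_but_min_freq(arr, n):
--     cnt = {}
--     for x in arr:
--         cnt[x] = cnt.get(x, 0) + 1
--     best = None  # (freq, key) of current answer
--     for k, v in cnt.items():
--         if best is None or v < best[0] or (v == best[0] and k > best[1]):
--             best = (v, k)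
--     return best[1]
-- ===== Notes on version B (the rewrite author's own statement) =====
-- stated objective: faster
-- what changed: B counts in one pass and then selects the (min-frequency, max-key) pair in a single streaming scan over the counter, instead of A's per-key recomputation of min(d.values()) inside a comprehension followed by max().
import Mathlib
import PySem

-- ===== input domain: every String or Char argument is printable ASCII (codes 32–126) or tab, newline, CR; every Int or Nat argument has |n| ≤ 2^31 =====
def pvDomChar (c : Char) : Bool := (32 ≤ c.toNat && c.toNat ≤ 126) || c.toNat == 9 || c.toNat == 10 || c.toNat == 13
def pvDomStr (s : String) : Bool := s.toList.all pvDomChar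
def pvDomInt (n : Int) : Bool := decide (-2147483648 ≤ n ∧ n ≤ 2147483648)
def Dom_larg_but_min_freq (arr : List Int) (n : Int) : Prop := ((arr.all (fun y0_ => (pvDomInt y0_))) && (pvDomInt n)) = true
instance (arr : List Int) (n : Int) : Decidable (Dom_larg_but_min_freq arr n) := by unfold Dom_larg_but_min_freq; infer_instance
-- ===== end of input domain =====

-- B replaces A's per-key recomputation of min(d.values()) and the final max() by one
-- streaming (min-frequency, max-key) selection over the counter.

-- ===== PORT A =====
def larg_but_min_freq (arr : List Int) (_n : Int) : Int :=
  let d := arr.foldl (fun d i =>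
      match d.get? i with
      | some v => d.insert i (v + 1)     -- d[i] += 1
      | none   => d.insert i 1) (PySem.Dict.empty : PySem.Dict Int Int)
  let array := (d.items.filter
      (fun kv => PySem.List.min? d.values (fun v => v) == some kv.2)).map (·.1)
  match PySem.List.max? array (fun x => x) with   -- max([]) raises ValueError: none excluded by Pre_
  | some m => m
  | none => 0

-- ===== PORT B =====
def larg_but_min_freq_alt (arr : List Int) (_n : Int) : Int :=
  let cnt := arr.foldl (fun d x => d.insert x (d.getD x 0 + 1)) (PySem.Dict.empty : PySem.Dict Int Int)
  let best := cnt.items.foldl (fun s kv =>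
      match s with
      | none => some (kv.2, kv.1)
      | some s => if kv.2 < s.1 ∨ (kv.2 = s.1 ∧ kv.1 > s.2) then some (kv.2, kv.1) else some s)
    (none : Option (Int × Int))
  match best with
  | some s => s.2
  | none => 0      -- best is None: Python B raises TypeError there; excluded by Pre_

-- ===== PRECONDITION & SPEC =====
-- Pre_ excludes only arr = [], where A raises ValueError (max of an empty sequence); B raises there too.
def Pre_larg_but_min_freq (arr : List Int) (n : Int) : Prop := arr ≠ []
instance (arr : List Int) (n : Int) : Decidable (Pre_larg_but_min_freq arr n) := by
  unfold Pre_larg_but_min_freq; infer_instance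
def pvWitness_larg_but_min_freq : List Int × Int := ([1, 2, 2], 3)

def Spec_larg_but_min_freq (arr : List Int) (n : Int) (out : Int) : Prop := out = larg_but_min_freq_alt arr n
instance (arr : List Int) (n : Int) (out : Int) : Decidable (Spec_larg_but_min_freq arr n out) := by unfold Spec_larg_but_min_freq; infer_instance

-- ===== CLAIM (what is proved, stated in full; the proofs are below) =====
def Claim_equal_larg_but_min_freq : Prop := ∀ (arr : List Int) (n : Int), Dom_larg_but_min_freq arr n → Pre_larg_but_min_freq arr n → Spec_larg_but_min_freq arr n (larg_but_min_freq arr n)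

-- ===== LEMMAS AND PROOFS =====

-- B's selection step on a (freq, key) state.
def pvSel (s : Int × Int) (kv : Int × Int) : Int × Int :=
  if kv.2 < s.1 ∨ (kv.2 = s.1 ∧ kv.1 > s.2) then (kv.2, kv.1) else s

-- B's fold, once started, is a fold of pvSel.
lemma fold_some (t : List (Int × Int)) : ∀ s : Int × Int,
    t.foldl (fun s kv =>
      match s with
      | none => some (kv.2, kv.1)
      | some s => if kv.2 < s.1 ∨ (kv.2 = s.1 ∧ kv.1 > s.2) then some (kv.2, kv.1) else some s)
      (some s) = some (t.foldl pvSel s) := by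
  induction t with
  | nil => intro s; rfl
  | cons q t ih =>
    intro s
    simp only [List.foldl_cons, pvSel]
    split_ifs with h <;> simp [ih]

-- Invariant of B's scan: the result comes from the seed or an item, carries the minimal
-- frequency, and its key is maximal among entries of that frequency.
lemma sel_inv (t : List (Int × Int)) : ∀ s : Int × Int,
    (t.foldl pvSel s = s ∨ ((t.foldl pvSel s).2, (t.foldl pvSel s).1) ∈ t) ∧
    (t.foldl pvSel s).1 ≤ s.1 ∧ (∀ q ∈ t, (t.foldl pvSel s).1 ≤ q.2) ∧
    ((t.foldl pvSel s).1 = s.1 → s.2 ≤ (t.foldl pvSel s).2) ∧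
    (∀ q ∈ t, q.2 = (t.foldl pvSel s).1 → q.1 ≤ (t.foldl pvSel s).2) := by
  induction t with
  | nil => intro s; simp
  | cons q t ih =>
    intro s
    simp only [List.foldl_cons]
    obtain ⟨hmem, hle, hall, hkey, hkall⟩ := ih (pvSel s q)
    set r := t.foldl pvSel (pvSel s q) with hr
    have hcase : pvSel s q = s ∨ pvSel s q = (q.2, q.1) := by
      unfold pvSel; split_ifs <;> simp
    have h11 : (pvSel s q).1 ≤ s.1 := by
      unfold pvSel; split_ifs with hcnd
      · simp; omega
      · omega
    have h12 : (pvSel s q).1 ≤ q.2 := by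
      unfold pvSel; split_ifs with hcnd
      · simp
      · omega
    have h2 : (pvSel s q).1 = s.1 → s.2 ≤ (pvSel s q).2 := by
      unfold pvSel; split_ifs with hcnd
      · intro hv; simp at hv ⊢; omega
      · intro _; omega
    have h3 : q.2 = (pvSel s q).1 → q.1 ≤ (pvSel s q).2 := by
      unfold pvSel; split_ifs with hcnd
      · intro _; simp
      · intro hv; omega
    refine ⟨?_, ?_, ?_, ?_, ?_⟩
    · rcases hmem with h | h
      · rcases hcase with hc | hc
        · exact Or.inl (h.trans hc)
        · have h4 : (r.2, r.1) = q := by rw [h, hc]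
          rw [h4]; exact Or.inr List.mem_cons_self
      · exact Or.inr (List.mem_cons_of_mem _ h)
    · omega
    · intro x hx
      rcases List.mem_cons.mp hx with hx | hx
      · subst hx; omega
      · exact hall x hx
    · intro hv
      have e1 : r.1 = (pvSel s q).1 := by omega
      exact le_trans (h2 (by omega)) (hkey e1)
    · intro x hx hxv
      rcases List.mem_cons.mp hx with hx | hx
      · rw [hx] at hxv
        have e1 : r.1 = (pvSel s q).1 := le_antisymm hle (by omega)
        rw [hx]
        exact le_trans (h3 (by omega)) (hkey e1)
      · exact hkall x hx hxv

-- The two counting loops build the same dict.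
lemma dict_eq (arr : List Int) :
    arr.foldl (fun d i =>
      match d.get? i with
      | some v => d.insert i (v + 1)
      | none   => d.insert i 1) (PySem.Dict.empty : PySem.Dict Int Int)
    = arr.foldl (fun d x => d.insert x (d.getD x 0 + 1)) (PySem.Dict.empty : PySem.Dict Int Int) := by
  apply PySem.List.foldl_congr_mem
  intro d i _
  rcases h : d.get? i with _ | v
  · simp [PySem.Dict.getD_eq_get?_getD, h]
  · simp [PySem.Dict.getD_eq_get?_getD, h]

-- The counting dict of a nonempty list has a nonempty items list.
lemma items_ne_nil (arr : List Int) (h : arr ≠ []) :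
    (arr.foldl (fun d x => d.insert x (d.getD x 0 + 1)) (PySem.Dict.empty : PySem.Dict Int Int)).items ≠ [] := by
  obtain ⟨x, t, rfl⟩ := List.exists_cons_of_ne_nil h
  intro hc
  have hk := PySem.Dict.keys_foldl_insert (x :: t) (fun d a => d.getD a 0 + 1)
    (PySem.Dict.empty : PySem.Dict Int Int)
  have hx : x ∈ (List.foldl (fun d x => d.insert x (d.getD x 0 + 1))
      (PySem.Dict.empty : PySem.Dict Int Int) (x :: t)).keys := by
    rw [hk]
    rw [PySem.Dict.keys_empty, PySem.Set.update_nil_left]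
    exact (PySem.Set.mem_ofList _ _).mpr List.mem_cons_self
  have hkeys : (List.foldl (fun d x => d.insert x (d.getD x 0 + 1))
      (PySem.Dict.empty : PySem.Dict Int Int) (x :: t)).keys = [] := by
    simp only [PySem.Dict.keys, hc, List.map_nil]
  rw [hkeys] at hx
  simp at hx

-- For any dict with a nonempty items list, A's filter-then-max equals B's streaming scan.
lemma core (d : PySem.Dict Int Int) (hne : d.items ≠ []) :
    (match PySem.List.max? ((d.items.filter
        (fun kv => PySem.List.min? d.values (fun v => v) == some kv.2)).map (·.1))
        (fun x => x) with
     | some m => m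
     | none => 0)
    = (match d.items.foldl (fun s kv =>
          match s with
          | none => some (kv.2, kv.1)
          | some s => if kv.2 < s.1 ∨ (kv.2 = s.1 ∧ kv.1 > s.2) then some (kv.2, kv.1) else some s)
        (none : Option (Int × Int)) with
       | some s => s.2
       | none => 0) := by
  obtain ⟨p, t, hitems⟩ := List.exists_cons_of_ne_nil hne
  rw [hitems, List.foldl_cons, fold_some t (p.2, p.1)]
  set r := t.foldl pvSel (p.2, p.1) with hr
  obtain ⟨hmem, hle, hall, hkey, hkall⟩ := sel_inv t (p.2, p.1)
  rw [← hr] at hmem hle hall hkey hkall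
  -- r is an item of d.items (as (key, freq) = (r.2, r.1))
  have hrmem : (r.2, r.1) ∈ (p :: t) := by
    rcases hmem with hm | hm
    · rw [hm]; exact List.mem_cons_self
    · exact List.mem_cons_of_mem _ hm
  -- min(d.values()) = r.1
  have hvals : d.values = (p :: t).map (·.2) := by
    show d.items.map (·.2) = _
    rw [hitems]
  have hvne : d.values ≠ [] := by rw [hvals]; simp
  obtain ⟨m, hm⟩ := Option.ne_none_iff_exists'.mp
    (fun hc => hvne ((PySem.List.min?_eq_none_iff d.values (fun v : Int => v)).mp hc))
  have hmmem := PySem.List.min?_mem hm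
  have hmmin := PySem.List.min?_isMin hm
  have hmval : m = r.1 := by
    have h1 : r.1 ≤ m := by
      rw [hvals] at hmmem
      rcases List.mem_cons.mp hmmem with h' | h'
      · simp at h'; omega
      · obtain ⟨q, hq, hq2⟩ := List.mem_map.mp h'
        have := hall q hq; omega
    have h2 : m ≤ r.1 := by
      have : r.1 ∈ d.values := by
        rw [hvals]
        exact List.mem_map.mpr ⟨(r.2, r.1), hrmem, rfl⟩
      exact hmmin _ this
    omega
  subst hmval
  -- the comprehension keeps exactly the keys of frequency r.1
  have harr : ((p :: t).filter
      (fun kv => PySem.List.min? d.values (fun v => v) == some kv.2)).map (·.1)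
      = ((p :: t).filter (fun kv => r.1 = kv.2)).map (·.1) := by
    congr 1
    apply List.filter_congr
    intro kv _
    rw [hm]
    by_cases hkv : r.1 = kv.2 <;> simp [hkv]
  rw [harr]
  set array := ((p :: t).filter (fun kv => r.1 = kv.2)).map (·.1) with harray
  have hrarr : r.2 ∈ array := by
    rw [harray]
    exact List.mem_map.mpr ⟨(r.2, r.1), List.mem_filter.mpr ⟨hrmem, by simp⟩, rfl⟩
  have hane : array ≠ [] := fun hc => by rw [hc] at hrarr; simp at hrarr
  obtain ⟨M, hM⟩ := Option.ne_none_iff_exists'.mp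
    (fun hc => hane ((PySem.List.max?_eq_none_iff array (fun x : Int => x)).mp hc))
  have hMmem := PySem.List.max?_mem hM
  have hMmax := PySem.List.max?_isMax hM
  have hMval : M = r.2 := by
    have h1 : M ≤ r.2 := by
      rw [harray] at hMmem
      obtain ⟨q, hq, hq1⟩ := List.mem_map.mp hMmem
      obtain ⟨hqd, hqm⟩ := List.mem_filter.mp hq
      simp only [decide_eq_true_eq] at hqm
      rcases List.mem_cons.mp hqd with h' | h'
      · subst h'
        have := hkey (by omega); omega
      · have := hkall q h' (by omega); omega
    have h2 : r.2 ≤ M := hMmax _ hrarr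
    omega
  rw [hM, hMval]

theorem main_eq (arr : List Int) (n : Int) (h : arr ≠ []) :
    larg_but_min_freq arr n = larg_but_min_freq_alt arr n := by
  unfold larg_but_min_freq larg_but_min_freq_alt
  rw [dict_eq]
  exact core _ (items_ne_nil arr h)

-- ===== VERDICT (by name: the statement is the Claim_ definition above) =====
theorem larg_but_min_freq_spec : Claim_equal_larg_but_min_freq := by
  intro arr n _ hpre
  unfold Spec_larg_but_min_freq
  exact main_eq arr n hpre
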